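-- pv_equiv track=rewrite | github.com/Aditya281122/Time_series_data_anomaly_detection | src/evaluate.py | merge_flags_to_events
-- ===== SOURCE A (Python) =====
-- def merge_flags_to_events(flags, gap=1):
--     """
--     Collapse consecutive 1s into event tuples (start_idx, end_idx).
--     end_idx is inclusive.
--     Merges events that are <= gap samples apart.
--     """
--     events = []
--     n = len(flags)
--     i = 0
--     while i < n:
--         if flags[i] == 1:
--             j = i
--             while j + 1 < n and flags[j+1] == 1:
--                 j += 1
--             events.append([i, j])
--             i = j + 1
--         else:
--             i += 1
--
--     # merge events that are <= gap apart
--     if gap > 0 and len(events) > 1: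
--         merged = []
--         for s, e in events:
--             if not merged:
--                 merged.append([s, e])
--             else:
--                 # if start of current is <= end of last + gap + 1
--                 # e.g. last=[0,1], curr=[3,4], gap=1. 3 - 1 = 2. 2 > 1? Yes. No merge.
--                 # gap is number of zeros allowed between ones.
--                 # if gap=1, 1 0 1 -> merged. indices 0, 2. 2 - 0 = 2. gap+1 = 2.
--                 if s - merged[-1][1] <= gap + 1:
--                     merged[-1][1] = e
--                 else:
--                     merged.append([s, e])
--         return [tuple(x) for x in merged]
--
--     return [tuple(x) for x in events]
-- ===== SOURCE B (Python) =====
-- def merge_flags_to_events(flags, gap=1):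
--     """Single left-to-right scan: maintain the open event [start, end] and a
--     counter of zeros seen since the last 1; merge or close on the fly."""
--     events = []
--     start = None
--     end = 0
--     zeros = 0
--     for i in range(len(flags)):
--         f = flags[i]
--         if f == 1:
--             if start is None:
--                 start = i
--             elif zeros == 0 or zeros <= gap:
--                 pass  # still inside the event (or merged across the gap)
--             else:
--                 events.append((start, end))
--                 start = i
--             end = i
--             zeros = 0
--         elif start is not None:
--             zeros += 1
--     if start is not None:
--         events.append((start, end))
--     return events
-- ===== Notes on version B (the rewrite author's own statement) =====
-- stated objective: simpler
-- what changed: Replaced A's two-pass build-runs-then-merge (nested index while-loops plus a separate merge fold over the event list) with one fused left-to-right scan that keeps an open [start,end] event and a trailing-zero counter, closing/merging events on the fly.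
import Mathlib
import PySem

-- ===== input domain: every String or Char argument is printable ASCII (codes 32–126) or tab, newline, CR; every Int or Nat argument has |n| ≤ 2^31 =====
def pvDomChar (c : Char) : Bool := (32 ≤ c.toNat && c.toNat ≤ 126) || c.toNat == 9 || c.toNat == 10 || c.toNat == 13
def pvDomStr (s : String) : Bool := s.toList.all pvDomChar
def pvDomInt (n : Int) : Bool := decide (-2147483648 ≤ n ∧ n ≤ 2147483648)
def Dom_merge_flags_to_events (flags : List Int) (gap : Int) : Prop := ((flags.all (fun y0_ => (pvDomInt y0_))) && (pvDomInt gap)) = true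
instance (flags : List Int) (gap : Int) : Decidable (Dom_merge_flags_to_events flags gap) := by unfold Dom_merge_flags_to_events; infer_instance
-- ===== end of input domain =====

-- B replaces A's build-runs-then-merge two-pass structure with one fused left-to-right
-- scan keeping an open event and a trailing-zero counter (objective: simpler).


-- ===== PORT A =====

-- inner while loop: advance j while j+1 < n and flags[j+1] == 1
def scanJA (flags : List Int) (j : Nat) : Nat :=
  if _h : j + 1 < flags.length ∧ flags.getD (j+1) 0 = 1 then scanJA flags (j+1) else j
termination_by flags.length - j
decreasing_by omega

theorem scanJA_ge (flags : List Int) (j : Nat) : j ≤ scanJA flags j := by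
  fun_induction scanJA with
  | case1 j h ih => omega
  | case2 j h => omega

-- outer while loop collecting the runs of 1s into events
def loopA (flags : List Int) (i : Nat) (events : List (Int × Int)) : List (Int × Int) :=
  if _h : i < flags.length then
    if flags.getD i 0 = 1 then
      loopA flags (scanJA flags i + 1) (events ++ [((i : Int), (scanJA flags i : Int))])
    else loopA flags (i+1) events
  else events
termination_by flags.length - i
decreasing_by
  · have : i ≤ scanJA flags i := scanJA_ge flags i
    omega
  · omega

-- one step of the merge loop ("for s, e in events")
def mergeStepA (gap : Int) (merged : List (Int × Int)) (se : Int × Int) : List (Int × Int) :=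
  match merged.getLast? with
  | none => [se]
  | some (ls, le) =>
      if se.1 - le ≤ gap + 1 then merged.dropLast ++ [(ls, se.2)] else merged ++ [se]

def merge_flags_to_events (flags : List Int) (gap : Int) : List (Int × Int) :=
  let events := loopA flags 0 []
  if gap > 0 ∧ 1 < events.length then events.foldl (mergeStepA gap) [] else events

-- ===== PORT B =====

-- the fused single scan of Source B ("for i in range(len(flags))"), state
-- (events, start, end, zeros); returns the state after the loop
def bLoopB (flags : List Int) (gap : Int) (i : Nat) (events : List (Int × Int))
    (start? : Option Int) (e : Int) (zeros : Int) : List (Int × Int) × Option Int × Int :=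
  if _h : i < flags.length then
    if flags.getD i 0 = 1 then
      match start? with
      | none => bLoopB flags gap (i+1) events (some (i : Int)) (i : Int) 0
      | some s =>
        if zeros = 0 ∨ zeros ≤ gap then bLoopB flags gap (i+1) events (some s) (i : Int) 0
        else bLoopB flags gap (i+1) (events ++ [(s, e)]) (some (i : Int)) (i : Int) 0
    else
      match start? with
      | none => bLoopB flags gap (i+1) events none e zeros
      | some s => bLoopB flags gap (i+1) events (some s) e (zeros + 1)
  else (events, start?, e)
termination_by flags.length - i

def merge_flags_to_events_alt (flags : List Int) (gap : Int) : List (Int × Int) :=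
  let r := bLoopB flags gap 0 [] none 0 0
  match r.2.1 with
  | none => r.1
  | some s => r.1 ++ [(s, r.2.2)]

-- ===== PRECONDITION & SPEC =====
def Spec_merge_flags_to_events (flags : List Int) (gap : Int) (out : List (Int × Int)) : Prop := out = merge_flags_to_events_alt flags gap
instance (flags : List Int) (gap : Int) (out : List (Int × Int)) : Decidable (Spec_merge_flags_to_events flags gap out) := by unfold Spec_merge_flags_to_events; infer_instance

-- ===== CLAIM (what is proved, stated in full; the proofs are below) =====
def Claim_equal_merge_flags_to_events : Prop := ∀ (flags : List Int) (gap : Int), Dom_merge_flags_to_events flags gap → Spec_merge_flags_to_events flags gap (merge_flags_to_events flags gap)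

-- ===== LEMMAS AND PROOFS =====

-- the list of maximal runs of 1s starting at index i (proof-side common spec)
def runsFrom (flags : List Int) (i : Nat) : List (Nat × Nat) :=
  if _h : i < flags.length then
    if flags.getD i 0 = 1 then (i, scanJA flags i) :: runsFrom flags (scanJA flags i + 1)
    else runsFrom flags (i+1)
  else []
termination_by flags.length - i
decreasing_by
  · have : i ≤ scanJA flags i := scanJA_ge flags i
    omega
  · omega

def castRun : Nat × Nat → Int × Int := fun se => ((se.1 : Int), (se.2 : Int))

-- structural form of the merge loop
def goI (gap : Int) : Int × Int → List (Int × Int) → List (Int × Int)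
  | se, [] => [se]
  | se, se' :: rest =>
      if se'.1 - se.2 ≤ gap + 1 then goI gap (se.1, se'.2) rest
      else se :: goI gap se' rest

def mergeRuns (gap : Int) : List (Int × Int) → List (Int × Int)
  | [] => []
  | r :: rest => goI gap r rest

-- ---- scanJA facts ----

theorem scanJA_lt (flags : List Int) (i : Nat) (h : i < flags.length) :
    scanJA flags i < flags.length := by
  fun_induction scanJA with
  | case1 j hc ih => exact ih hc.1
  | case2 j hc => exact h

theorem scanJA_exit (flags : List Int) (i : Nat) :
    ¬ (scanJA flags i + 1 < flags.length ∧ flags.getD (scanJA flags i + 1) 0 = 1) := by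
  fun_induction scanJA with
  | case1 j hc ih => exact ih
  | case2 j hc => exact hc

theorem scanJA_all (flags : List Int) (i : Nat) :
    ∀ k, i < k → k ≤ scanJA flags i → flags.getD k 0 = 1 := by
  fun_induction scanJA with
  | case1 j hc ih =>
      intro k hk1 hk2
      rcases Nat.lt_or_ge (j+1) k with h | h
      · exact ih k h hk2
      · have : k = j + 1 := by omega
        subst this; exact hc.2
  | case2 j hc =>
      intro k hk1 hk2; omega

-- ---- runsFrom facts ----

theorem runsFrom_start_ge (flags : List Int) (i : Nat) :
    ∀ r ∈ runsFrom flags i, i ≤ r.1 := by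
  fun_induction runsFrom with
  | case1 i h1 h2 ih =>
      intro r hr
      rcases List.mem_cons.mp hr with h | h
      · subst h; exact le_refl _
      · have := scanJA_ge flags i
        have := ih r h; omega
  | case2 i h1 h2 ih =>
      intro r hr; have := ih r hr; omega
  | case3 i h1 => intro r hr; simp at hr

theorem runsFrom_sep (flags : List Int) (i : Nat) :
    List.IsChain (fun a b : Nat × Nat => a.2 + 2 ≤ b.1) (runsFrom flags i) := by
  fun_induction runsFrom with
  | case1 i h1 h2 ih =>
      refine List.isChain_cons.mpr ⟨?_, ih⟩
      intro b hb
      have hbmem : b ∈ runsFrom flags (scanJA flags i + 1) := List.mem_of_mem_head? hb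
      have hex := scanJA_exit flags i
      by_cases hlt : scanJA flags i + 1 < flags.length
      · have hne : flags.getD (scanJA flags i + 1) 0 ≠ 1 := fun hc => hex ⟨hlt, hc⟩
        rw [runsFrom, dif_pos hlt, if_neg hne] at hbmem
        have := runsFrom_start_ge flags (scanJA flags i + 1 + 1) b hbmem
        omega
      · rw [runsFrom, dif_neg hlt] at hbmem
        simp at hbmem
  | case2 i h1 h2 ih => exact ih
  | case3 i h1 => exact List.isChain_nil

-- ---- A characterised by runsFrom + mergeRuns ----

theorem loopA_spec (flags : List Int) (i : Nat) (events : List (Int × Int)) :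
    loopA flags i events = events ++ (runsFrom flags i).map castRun := by
  fun_induction loopA with
  | case1 i ev h1 h2 ih =>
      conv_rhs => rw [runsFrom]
      rw [ih, dif_pos h1, if_pos h2]
      simp [castRun]
  | case2 i ev h1 h2 ih =>
      conv_rhs => rw [runsFrom]
      rw [ih, dif_pos h1, if_neg h2]
  | case3 i ev h1 =>
      rw [runsFrom, dif_neg h1]; simp

theorem mergeA_fold (gap : Int) (rest : List (Int × Int)) :
    ∀ (acc : List (Int × Int)) (s e : Int),
      List.foldl (mergeStepA gap) (acc ++ [(s, e)]) rest = acc ++ goI gap (s, e) rest := by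
  induction rest with
  | nil => intro acc s e; simp [goI]
  | cons se' rest' ih =>
      intro acc s e
      obtain ⟨s', e'⟩ := se'
      simp only [List.foldl_cons]
      have hstep : mergeStepA gap (acc ++ [(s, e)]) (s', e') =
          if s' - e ≤ gap + 1 then acc ++ [(s, e')] else (acc ++ [(s, e)]) ++ [(s', e')] := by
        simp [mergeStepA]
      rw [hstep]
      by_cases hc : s' - e ≤ gap + 1
      · rw [if_pos hc, ih acc s e']
        rw [goI, if_pos (by simpa using hc)]
      · rw [if_neg hc, ih (acc ++ [(s, e)]) s' e']
        rw [goI, if_neg (by simpa using hc)]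
        simp

theorem mergeA_eq (gap : Int) (rs : List (Int × Int)) :
    List.foldl (mergeStepA gap) [] rs = mergeRuns gap rs := by
  cases rs with
  | nil => rfl
  | cons r rest =>
      obtain ⟨s, e⟩ := r
      have h0 : mergeStepA gap [] (s, e) = [] ++ [(s, e)] := by simp [mergeStepA]
      simp only [List.foldl_cons, h0]
      rw [mergeA_fold]
      rfl

theorem goI_nomerge (gap : Int) (hg : gap ≤ 0) :
    ∀ (rest : List (Int × Int)) (s e : Int),
      (∀ b ∈ rest.head?, e + 2 ≤ b.1) →
      List.IsChain (fun a b : Int × Int => a.2 + 2 ≤ b.1) rest →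
      goI gap (s, e) rest = (s, e) :: rest := by
  intro rest
  induction rest with
  | nil => intro s e _ _; rfl
  | cons se' rest' ih =>
      intro s e hhead hch
      obtain ⟨s', e'⟩ := se'
      have hsep : e + 2 ≤ s' := hhead (s', e') rfl
      rw [goI, if_neg (by simp; omega)]
      congr 1
      rcases List.isChain_cons.mp hch with ⟨hh, ht⟩
      exact ih s' e' (by intro b hb; exact hh b hb) ht

theorem mergeRuns_nomerge (gap : Int) (hg : gap ≤ 0) (rs : List (Int × Int))
    (hch : List.IsChain (fun a b : Int × Int => a.2 + 2 ≤ b.1) rs) :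
    mergeRuns gap rs = rs := by
  cases rs with
  | nil => rfl
  | cons r rest =>
      obtain ⟨s, e⟩ := r
      rcases List.isChain_cons.mp hch with ⟨hh, ht⟩
      exact goI_nomerge gap hg rest s e hh ht

theorem mergeRuns_short (gap : Int) (rs : List (Int × Int)) (h : rs.length ≤ 1) :
    mergeRuns gap rs = rs := by
  match rs with
  | [] => rfl
  | [r] => rfl
  | a :: b :: t => simp at h

theorem chain'_cast (flags : List Int) (i : Nat) :
    List.IsChain (fun a b : Int × Int => a.2 + 2 ≤ b.1) ((runsFrom flags i).map castRun) := by
  rw [List.isChain_map]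
  refine (runsFrom_sep flags i).imp ?_
  intro a b hab
  simp only [castRun]
  omega

theorem A_char (flags : List Int) (gap : Int) :
    merge_flags_to_events flags gap = mergeRuns gap ((runsFrom flags 0).map castRun) := by
  unfold merge_flags_to_events
  rw [loopA_spec]
  simp only [List.nil_append]
  by_cases hc : gap > 0 ∧ 1 < ((runsFrom flags 0).map castRun).length
  · rw [if_pos hc, mergeA_eq]
  · rw [if_neg hc]
    rcases not_and_or.mp hc with h | h
    · exact (mergeRuns_nomerge gap (by omega) _ (chain'_cast flags 0)).symm
    · exact (mergeRuns_short gap _ (by omega)).symm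

-- ---- B characterised by runsFrom + mergeRuns ----

def finishB (r : List (Int × Int) × Option Int × Int) : List (Int × Int) :=
  match r.2.1 with
  | none => r.1
  | some s => r.1 ++ [(s, r.2.2)]

-- crossing a block of consecutive 1s keeps the event open and moves end forward
theorem bLoopB_run (flags : List Int) (gap : Int) (j : Nat) (hj : j < flags.length) :
    ∀ d i, j - i = d → i ≤ j → (∀ k, i ≤ k → k ≤ j → flags.getD k 0 = 1) →
    ∀ (ev : List (Int × Int)) (s e : Int),
      bLoopB flags gap i ev (some s) e 0 = bLoopB flags gap (j+1) ev (some s) (j : Int) 0 := by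
  intro d
  induction d with
  | zero =>
      intro i hd hij hall ev s e
      have : i = j := by omega
      subst this
      rw [bLoopB, dif_pos hj, if_pos (hall i le_rfl le_rfl)]
      simp
  | succ d ih =>
      intro i hd hij hall ev s e
      have hilt : i < j := by omega
      rw [bLoopB, dif_pos (by omega), if_pos (hall i le_rfl (by omega))]
      simp only [true_or, if_true]
      exact ih (i+1) (by omega) (by omega) (fun k h1 h2 => hall k (by omega) h2) ev s (i : Int)

theorem bLoopB_open (flags : List Int) (gap : Int) :
    ∀ m i, flags.length - i ≤ m →
    ∀ (ev : List (Int × Int)) (s e zeros : Int),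
      zeros = (i : Int) - 1 - e →
      e + 1 ≤ (i : Int) →
      (flags.getD i 0 = 1 → (i : Int) ≠ e + 1) →
      finishB (bLoopB flags gap i ev (some s) e zeros) =
        ev ++ goI gap (s, e) ((runsFrom flags i).map castRun) := by
  intro m
  induction m with
  | zero =>
      intro i hm ev s e zeros hz he hne
      have hge : ¬ i < flags.length := by omega
      rw [bLoopB, dif_neg hge, runsFrom, dif_neg hge]
      simp [finishB, goI]
  | succ m ih =>
      intro i hm ev s e zeros hz he hne
      by_cases hlt : i < flags.length
      · by_cases hone : flags.getD i 0 = 1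
        · -- a run of 1s starts at i
          set j := scanJA flags i with hjdef
          have hij : i ≤ j := scanJA_ge flags i
          have hjlt : j < flags.length := scanJA_lt flags i hlt
          have hall : ∀ k, i ≤ k → k ≤ j → flags.getD k 0 = 1 := by
            intro k h1 h2
            rcases Nat.eq_or_lt_of_le h1 with h | h
            · subst h; exact hone
            · exact scanJA_all flags i k h h2
          have hnz : zeros ≠ 0 := by
            have := hne hone; omega
          have hrun : ∀ ev' (s' : Int),
              bLoopB flags gap (i+1) ev' (some s') (i : Int) 0 =
              bLoopB flags gap (j+1) ev' (some s') (j : Int) 0 := by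
            intro ev' s'
            rcases Nat.eq_or_lt_of_le hij with h | h
            · rw [← h]
            · exact bLoopB_run flags gap j hjlt (j - (i+1)) (i+1) rfl (by omega)
                (fun k h1 h2 => hall k (by omega) h2) ev' s' (i : Int)
          have hnext : ∀ ev' (s' : Int),
              finishB (bLoopB flags gap (j+1) ev' (some s') (j : Int) 0) =
              ev' ++ goI gap (s', (j : Int)) ((runsFrom flags (j+1)).map castRun) := by
            intro ev' s'
            refine ih (j+1) (by omega) ev' s' (j : Int) 0 (by push_cast; ring) (by push_cast; omega) ?_
            intro hc1
            exfalso
            have hex := scanJA_exit flags i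
            rw [← hjdef] at hex
            by_cases h2 : j + 1 < flags.length
            · exact hex ⟨h2, hc1⟩
            · rw [List.getD_eq_default _ _ (by omega)] at hc1
              exact absurd hc1 (by norm_num)
          have hruns : runsFrom flags i = (i, j) :: runsFrom flags (j+1) := by
            rw [runsFrom, dif_pos hlt, if_pos hone]
          rw [bLoopB, dif_pos hlt, if_pos hone]
          by_cases hmerge : zeros = 0 ∨ zeros ≤ gap
          · rw [if_pos hmerge, hrun, hnext]
            rw [hruns]
            simp only [List.map_cons]
            rw [goI, if_pos (by simp [castRun]; omega)]
            simp [castRun]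
          · rw [if_neg hmerge, hrun, hnext]
            rw [hruns]
            simp only [List.map_cons]
            rw [goI, if_neg (by simp [castRun]; omega)]
            simp [castRun]
        · -- flags[i] ≠ 1 : zero counter grows
          rw [bLoopB, dif_pos hlt, if_neg hone]
          rw [ih (i+1) (by omega) ev s e (zeros + 1) (by push_cast; omega) (by push_cast; omega)
            (by intro _; push_cast; omega)]
          conv_rhs => rw [runsFrom]
          rw [dif_pos hlt, if_neg hone]
      · rw [bLoopB, dif_neg hlt, runsFrom, dif_neg hlt]
        simp [finishB, goI]

theorem bLoopB_closed (flags : List Int) (gap : Int) :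
    ∀ m i, flags.length - i ≤ m →
    ∀ (ev : List (Int × Int)) (e0 z0 : Int),
      finishB (bLoopB flags gap i ev none e0 z0) =
        ev ++ mergeRuns gap ((runsFrom flags i).map castRun) := by
  intro m
  induction m with
  | zero =>
      intro i hm ev e0 z0
      have hge : ¬ i < flags.length := by omega
      rw [bLoopB, dif_neg hge, runsFrom, dif_neg hge]
      simp [finishB, mergeRuns]
  | succ m ih =>
      intro i hm ev e0 z0
      by_cases hlt : i < flags.length
      · by_cases hone : flags.getD i 0 = 1
        · set j := scanJA flags i with hjdef
          have hij : i ≤ j := scanJA_ge flags i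
          have hjlt : j < flags.length := scanJA_lt flags i hlt
          have hall : ∀ k, i ≤ k → k ≤ j → flags.getD k 0 = 1 := by
            intro k h1 h2
            rcases Nat.eq_or_lt_of_le h1 with h | h
            · subst h; exact hone
            · exact scanJA_all flags i k h h2
          rw [bLoopB, dif_pos hlt, if_pos hone]
          have hrun : bLoopB flags gap (i+1) ev (some (i : Int)) (i : Int) 0 =
              bLoopB flags gap (j+1) ev (some (i : Int)) (j : Int) 0 := by
            rcases Nat.eq_or_lt_of_le hij with h | h
            · rw [← h]
            · exact bLoopB_run flags gap j hjlt (j - (i+1)) (i+1) rfl (by omega)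
                (fun k h1 h2 => hall k (by omega) h2) ev (i : Int) (i : Int)
          rw [hrun]
          rw [bLoopB_open flags gap (flags.length - (j+1)) (j+1) le_rfl ev (i : Int) (j : Int) 0
            (by push_cast; ring) (by push_cast; omega) ?_]
          · conv_rhs => rw [runsFrom]
            rw [dif_pos hlt, if_pos hone]
            simp [mergeRuns, castRun]
            rw [← hjdef]
          · intro hc1
            exfalso
            have hex := scanJA_exit flags i
            rw [← hjdef] at hex
            by_cases h2 : j + 1 < flags.length
            · exact hex ⟨h2, hc1⟩
            · rw [List.getD_eq_default _ _ (by omega)] at hc1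
              exact absurd hc1 (by norm_num)
        · rw [bLoopB, dif_pos hlt, if_neg hone]
          rw [ih (i+1) (by omega) ev e0 z0]
          conv_rhs => rw [runsFrom]
          rw [dif_pos hlt, if_neg hone]
      · rw [bLoopB, dif_neg hlt, runsFrom, dif_neg hlt]
        simp [finishB, mergeRuns]

theorem B_char (flags : List Int) (gap : Int) :
    merge_flags_to_events_alt flags gap = mergeRuns gap ((runsFrom flags 0).map castRun) := by
  have h := bLoopB_closed flags gap flags.length 0 (by omega) [] 0 0
  simpa [finishB, merge_flags_to_events_alt] using h

-- ===== VERDICT (by name: the statement is the Claim_ definition above) =====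
theorem merge_flags_to_events_spec : Claim_equal_merge_flags_to_events := by
  intro flags gap _
  unfold Spec_merge_flags_to_events
  rw [A_char, B_char]
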